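-- pv_equiv track=rewrite | github.com/sebastiansabo/Conta-Bilant-Generator | app.py | parse_ct_formula
-- ===== SOURCE A (Python) =====
-- def parse_ct_formula(expr):
--     """
--     Parse CT formula into list of (prefix, sign_type) tuples.
--     sign_type: 'normal_plus', 'normal_minus', 'dynamic'
--
--     Handles: 345+346-2801+/-348-dinct.4428
--     """
--     if not expr:
--         return []
--
--     items = []
--     i = 0
--     sign = 1  # 1 for plus, -1 for minus
--
--     while i < len(expr):
--         # Check for "+/-" dynamic sign
--         if expr[i:i+3] == '+/-':
--             i += 3
--             # Read the number after +/-
--             num = ''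
--             while i < len(expr) and expr[i].isdigit():
--                 num += expr[i]
--                 i += 1
--             if num:
--                 items.append((num, 'dynamic'))
--             continue
--
--         # Check for "dinct." special case
--         if expr[i:i+6].lower() == 'dinct.':
--             i += 6
--             num = ''
--             while i < len(expr) and expr[i].isdigit():
--                 num += expr[i]
--                 i += 1
--             if num:
--                 items.append((num, 'normal_minus'))  # dinct is always subtracted
--             continue
--
--         # Handle signs
--         if expr[i] == '+':
--             sign = 1
--             i += 1
--             continue
--         elif expr[i] == '-':
--             sign = -1
--             i += 1
--             continue
--
--         # Read number
--         if expr[i].isdigit():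
--             num = ''
--             while i < len(expr) and expr[i].isdigit():
--                 num += expr[i]
--                 i += 1
--             if num:
--                 sign_type = 'normal_plus' if sign == 1 else 'normal_minus'
--                 items.append((num, sign_type))
--             sign = 1  # Reset sign
--             continue
--
--         # Skip other characters
--         i += 1
--
--     return items
-- ===== SOURCE B (Python) =====
-- # Two-phase re-implementation: a lexer that produces a flat token list, then a
-- # small fold that interprets sign state over the tokens.
--
-- def _digits(expr, i):
--     """Return (digit run starting at i, index just past it)."""
--     j = i
--     while j < len(expr) and expr[j].isdigit():
--         j += 1
--     return expr[i:j], j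
--
--
-- def _tokenize(expr):
--     tokens = []
--     i = 0
--     n = len(expr)
--     while i < n:
--         if expr.startswith('+/-', i):
--             num, i = _digits(expr, i + 3)
--             tokens.append(('dyn', num))
--         elif expr[i:i+6].lower() == 'dinct.':
--             num, i = _digits(expr, i + 6)
--             tokens.append(('dinct', num))
--         elif expr[i] == '+':
--             tokens.append(('sign', '+'))
--             i += 1
--         elif expr[i] == '-':
--             tokens.append(('sign', '-'))
--             i += 1
--         elif expr[i].isdigit():
--             num, i = _digits(expr, i)
--             tokens.append(('num', num))
--         else:
--             i += 1
--     return tokens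
--
--
-- def parse_ct_formula(expr):
--     items = []
--     sign = 1
--     for kind, s in _tokenize(expr):
--         if kind == 'sign':
--             sign = 1 if s == '+' else -1
--         elif kind == 'num':
--             items.append((s, 'normal_plus' if sign == 1 else 'normal_minus'))
--             sign = 1
--         elif s:  # 'dyn' / 'dinct' with a non-empty digit run
--             items.append((s, 'dynamic' if kind == 'dyn' else 'normal_minus'))
--     return items
-- ===== Notes on version B (the rewrite author's own statement) =====
-- stated objective: alternative
-- what changed: A's single interleaved index state machine is split into a lexer producing a flat token list and a separate fold that interprets the sign state over the tokens.
import Mathlib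
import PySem

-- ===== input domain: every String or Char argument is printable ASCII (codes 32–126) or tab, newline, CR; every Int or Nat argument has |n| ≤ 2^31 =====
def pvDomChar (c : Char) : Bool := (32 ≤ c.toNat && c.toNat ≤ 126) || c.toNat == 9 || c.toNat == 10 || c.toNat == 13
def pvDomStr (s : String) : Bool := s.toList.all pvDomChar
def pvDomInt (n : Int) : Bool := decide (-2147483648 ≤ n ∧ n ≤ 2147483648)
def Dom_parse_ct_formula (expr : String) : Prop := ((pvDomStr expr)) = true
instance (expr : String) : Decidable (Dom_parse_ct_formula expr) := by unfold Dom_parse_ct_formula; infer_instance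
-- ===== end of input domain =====

-- B restructures A's single interleaved state machine into a lexer (token list) plus a fold
-- interpreting the sign state; return values are proved equal on the whole domain.
-- Both while-loops over the string are ported as recursion on the remaining suffix, with a
-- fuel argument (initially the string length) solely as a structural termination guard: each
-- iteration consumes at least one character, so the fuel never runs out before the suffix does.

-- ===== PORT A =====

-- inner `while i < len(expr) and expr[i].isdigit(): num += expr[i]; i += 1` of A,
-- carrying the remaining suffix; returns (num, remaining suffix)
def readDigitsA (s : List Char) (num : List Char) : List Char × List Char :=
  match s with
  | [] => (num, [])
  | c :: rest =>
    if PySem.Chars.isdigit c then readDigitsA rest (num ++ [c]) else (num, c :: rest)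

-- main `while i < len(expr)` loop of A; `s` is the remaining suffix expr[i:],
-- so `expr[i:i+3]` is `s.take 3`, `expr[i]` is the head of `s`
def loopA : Nat → List Char → Int → List (String × String) → List (String × String)
  | 0, _, _, items => items
  | fuel + 1, s, sign, items =>
    match s with
    | [] => items
    | c :: rest =>
      if List.take 3 (c :: rest) = "+/-".toList then
        let r := readDigitsA (List.drop 3 (c :: rest)) []
        loopA fuel r.2 sign
          (if r.1 ≠ [] then items ++ [(String.ofList r.1, "dynamic")] else items)
      else if PySem.Chars.lower (List.take 6 (c :: rest)) = "dinct.".toList then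
        let r := readDigitsA (List.drop 6 (c :: rest)) []
        loopA fuel r.2 sign
          (if r.1 ≠ [] then items ++ [(String.ofList r.1, "normal_minus")] else items)
      else if c = '+' then loopA fuel rest 1 items
      else if c = '-' then loopA fuel rest (-1) items
      else if PySem.Chars.isdigit c then
        let r := readDigitsA (c :: rest) []
        loopA fuel r.2 1
          (if r.1 ≠ [] then
            items ++ [(String.ofList r.1, if sign = 1 then "normal_plus" else "normal_minus")]
          else items)
      else loopA fuel rest sign items

def parse_ct_formula (expr : String) : List (String × String) :=
  if expr.toList = [] then [] else loopA expr.toList.length expr.toList 1 []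

-- ===== PORT B =====

-- `_digits(expr, i)` of Source B on the remaining suffix: (digit run, suffix past it)
def splitDigitsB (s : List Char) : List Char × List Char :=
  match s with
  | [] => ([], [])
  | c :: rest =>
    if PySem.Chars.isdigit c then
      let r := splitDigitsB rest
      (c :: r.1, r.2)
    else ([], c :: rest)

-- `_tokenize` of Source B (fuel as above)
def tokB : Nat → List Char → List (String × List Char) → List (String × List Char)
  | 0, _, toks => toks
  | fuel + 1, s, toks =>
    match s with
    | [] => toks
    | c :: rest =>
      if PySem.Chars.startswith (c :: rest) "+/-".toList then
        let r := splitDigitsB (List.drop 3 (c :: rest))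
        tokB fuel r.2 (toks ++ [("dyn", r.1)])
      else if PySem.Chars.lower (List.take 6 (c :: rest)) = "dinct.".toList then
        let r := splitDigitsB (List.drop 6 (c :: rest))
        tokB fuel r.2 (toks ++ [("dinct", r.1)])
      else if c = '+' then tokB fuel rest (toks ++ [("sign", ['+'])])
      else if c = '-' then tokB fuel rest (toks ++ [("sign", ['-'])])
      else if PySem.Chars.isdigit c then
        let r := splitDigitsB (c :: rest)
        tokB fuel r.2 (toks ++ [("num", r.1)])
      else tokB fuel rest toks

-- body of the `for kind, s in _tokenize(expr)` loop of Source B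
def stepB (st : List (String × String) × Int) (tok : String × List Char) :
    List (String × String) × Int :=
  if tok.1 = "sign" then (st.1, if tok.2 = ['+'] then 1 else -1)
  else if tok.1 = "num" then
    (st.1 ++ [(String.ofList tok.2, if st.2 = 1 then "normal_plus" else "normal_minus")], 1)
  else if tok.2 ≠ [] then
    (st.1 ++ [(String.ofList tok.2, if tok.1 = "dyn" then "dynamic" else "normal_minus")], st.2)
  else st

def parse_ct_formula_alt (expr : String) : List (String × String) :=
  (List.foldl stepB ([], 1) (tokB expr.toList.length expr.toList [])).1

-- ===== PRECONDITION & SPEC =====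
def Spec_parse_ct_formula (expr : String) (out : List (String × String)) : Prop := out = parse_ct_formula_alt expr
instance (expr : String) (out : List (String × String)) : Decidable (Spec_parse_ct_formula expr out) := by unfold Spec_parse_ct_formula; infer_instance

-- ===== CLAIM (what is proved, stated in full; the proofs are below) =====
def Claim_equal_parse_ct_formula : Prop := ∀ (expr : String), Dom_parse_ct_formula expr → Spec_parse_ct_formula expr (parse_ct_formula expr)

-- ===== LEMMAS AND PROOFS =====

-- A's accumulator-style digit reader computes B's split of the digit run
theorem readDigitsA_eq (s : List Char) : ∀ num : List Char,
    readDigitsA s num = (num ++ (splitDigitsB s).1, (splitDigitsB s).2) := by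
  induction s with
  | nil => intro num; simp [readDigitsA, splitDigitsB]
  | cons c rest ih =>
    intro num
    by_cases h : PySem.Chars.isdigit c = true <;>
      simp [readDigitsA, splitDigitsB, h, ih]

-- the tokenizer's accumulator distributes over append
theorem tokB_append : ∀ (fuel : Nat) (s : List Char) (t₁ t₂ : List (String × List Char)),
    tokB fuel s (t₁ ++ t₂) = t₁ ++ tokB fuel s t₂ := by
  intro fuel
  induction fuel with
  | zero => intro s t₁ t₂; rfl
  | succ fuel ih =>
    intro s t₁ t₂
    match s with
    | [] => rfl
    | c :: rest =>
      show tokB (fuel + 1) (c :: rest) (t₁ ++ t₂) = t₁ ++ tokB (fuel + 1) (c :: rest) t₂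
      rw [tokB, tokB]
      split_ifs <;> simp only [List.append_assoc, ih]

theorem tokB_cons (fuel : Nat) (s : List Char) (t : String × List Char) :
    tokB fuel s [t] = t :: tokB fuel s [] := by
  have h := tokB_append fuel s [t] []
  simpa using h

-- A's 3-character slice test is B's startswith test
theorem cond_dyn (s : List Char) :
    (List.take 3 s = "+/-".toList) ↔ PySem.Chars.startswith s "+/-".toList = true := by
  rw [PySem.Chars.startswith_iff, List.prefix_iff_eq_take]
  have hl : ("+/-".toList).length = 3 := by decide
  rw [hl]
  exact eq_comm

-- the core simulation: A's loop equals folding B's step over B's token stream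
theorem loopA_eq : ∀ (fuel : Nat) (s : List Char) (sign : Int)
    (items : List (String × String)),
    loopA fuel s sign items = (List.foldl stepB (items, sign) (tokB fuel s [])).1 := by
  intro fuel
  induction fuel with
  | zero => intro s sign items; rfl
  | succ fuel ih =>
    intro s sign items
    match s with
    | [] => rfl
    | c :: rest =>
      rw [loopA, tokB]
      by_cases h1 : List.take 3 (c :: rest) = "+/-".toList
      · rw [if_pos h1, if_pos ((cond_dyn (c :: rest)).mp h1)]
        simp only [List.nil_append]
        rw [tokB_cons, List.foldl_cons]
        rw [ih, readDigitsA_eq, List.nil_append]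
        simp only [stepB]
        norm_num
        split <;> rfl
      · rw [if_neg h1, if_neg (fun hw => h1 ((cond_dyn (c :: rest)).mpr hw))]
        by_cases h2 : PySem.Chars.lower (List.take 6 (c :: rest)) = "dinct.".toList
        · rw [if_pos h2, if_pos h2]
          simp only [List.nil_append]
          rw [tokB_cons, List.foldl_cons]
          rw [ih, readDigitsA_eq, List.nil_append]
          simp only [stepB]
          norm_num
          split <;> rfl
        · rw [if_neg h2, if_neg h2]
          by_cases h3 : c = '+'
          · rw [if_pos h3, if_pos h3]
            simp only [List.nil_append]
            rw [tokB_cons, List.foldl_cons]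
            rw [ih]
            simp [stepB]
          · rw [if_neg h3, if_neg h3]
            by_cases h4 : c = '-'
            · rw [if_pos h4, if_pos h4]
              simp only [List.nil_append]
              rw [tokB_cons, List.foldl_cons]
              rw [ih]
              simp [stepB]
            · rw [if_neg h4, if_neg h4]
              by_cases h5 : PySem.Chars.isdigit c = true
              · rw [if_pos h5, if_pos h5]
                simp only [List.nil_append]
                rw [tokB_cons, List.foldl_cons]
                rw [ih, readDigitsA_eq, List.nil_append]
                have hne : (splitDigitsB (c :: rest)).1 ≠ [] := by
                  simp [splitDigitsB, h5]
                simp [stepB, hne]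
              · rw [if_neg h5, if_neg h5]
                exact ih rest sign items

-- ===== VERDICT (by name: the statement is the Claim_ definition above) =====
theorem parse_ct_formula_spec : Claim_equal_parse_ct_formula := by
  intro expr _
  unfold Spec_parse_ct_formula parse_ct_formula parse_ct_formula_alt
  by_cases h : expr.toList = []
  · rw [if_pos h, h]
    rfl
  · rw [if_neg h, loopA_eq]
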